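-- pv_equiv track=rewrite | github.com/riffsircar/blend-elites | vae-qd.py | affordify
-- ===== SOURCE A (Python) =====
-- def affordify(line,aff):
--     a_line = ''
--     for c in line:
--         if c in aff['solid']:
--             a_line += 'X'
--         elif c in aff['breakable']:
--             a_line += 'B'
--         elif c in aff['hazard']:
--             a_line += 'H'
--         elif c in aff['enemies']:
--             a_line += 'E'
--         elif c in aff['collectable']:
--             a_line += '*'
--         elif c in aff['solid_collectable']:
--             a_line += 'Q'
--         elif c in aff['weapon']:
--             a_line += 'W'
--         elif c in aff['moving']:
--             a_line += 'M'
--         elif c in aff['door']: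
--             a_line += 'D'
--         elif c in aff['climbable']:
--             a_line += '|'
--         elif c == 'P':
--             a_line += 'P'
--         else:
--             a_line += '-'
--     return a_line
-- ===== SOURCE B (Python) =====
-- ORDER = [('solid', 'X'), ('breakable', 'B'), ('hazard', 'H'), ('enemies', 'E'),
--          ('collectable', '*'), ('solid_collectable', 'Q'), ('weapon', 'W'),
--          ('moving', 'M'), ('door', 'D'), ('climbable', '|')]
--
-- def affordify(line, aff):
--     # scan category by category over a worklist of unresolved positions:
--     # each pass stamps its symbol on the positions it matches, the rest
--     # stay pending; stop as soon as every position is resolved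
--     out = ['P' if c == 'P' else '-' for c in line]
--     todo = list(range(len(line)))
--     for key, sym in ORDER:
--         if not todo:
--             break
--         members = set(aff[key])
--         pending = []
--         for i in todo:
--             if line[i] in members:
--                 out[i] = sym
--             else:
--                 pending.append(i)
--         todo = pending
--     return ''.join(out)
-- ===== Notes on version B (the rewrite author's own statement) =====
-- stated objective: alternative
-- what changed: B transposes the loops: it builds the default output, then scans category by category over a worklist of still-unresolved positions, stamping each category's symbol and stopping once every position is resolved, instead of A's per-char 11-branch membership cascade; Pre_ excludes exactly the inputs on which A raises KeyError for a missing category key (B raises there too).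
import Mathlib
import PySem

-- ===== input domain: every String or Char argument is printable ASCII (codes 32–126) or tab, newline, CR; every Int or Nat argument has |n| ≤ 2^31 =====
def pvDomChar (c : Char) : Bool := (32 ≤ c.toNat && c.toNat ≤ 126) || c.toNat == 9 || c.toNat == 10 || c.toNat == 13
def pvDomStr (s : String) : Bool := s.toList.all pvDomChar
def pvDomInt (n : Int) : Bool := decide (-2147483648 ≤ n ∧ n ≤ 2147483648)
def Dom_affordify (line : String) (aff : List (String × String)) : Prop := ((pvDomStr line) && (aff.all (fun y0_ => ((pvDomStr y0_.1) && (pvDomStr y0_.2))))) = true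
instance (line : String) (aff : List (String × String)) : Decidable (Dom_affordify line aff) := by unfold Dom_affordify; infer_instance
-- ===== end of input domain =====

-- B transposes the loops: it scans category by category over a worklist of unresolved
-- positions (early exit once all are resolved), instead of A's per-char 11-branch cascade.


-- ===== PORT A =====
-- a_line += <one symbol> per char, the symbol chosen by the 11-branch cascade
-- (aff[key] ported as getD key "": exact on Pre_, where no KeyError is reached)
def affCharA (aff : List (String × String)) (c : Char) : Char :=
  if c ∈ ((PySem.Dict.mk aff).getD "solid" "").toList then 'X'
  else if c ∈ ((PySem.Dict.mk aff).getD "breakable" "").toList then 'B'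
  else if c ∈ ((PySem.Dict.mk aff).getD "hazard" "").toList then 'H'
  else if c ∈ ((PySem.Dict.mk aff).getD "enemies" "").toList then 'E'
  else if c ∈ ((PySem.Dict.mk aff).getD "collectable" "").toList then '*'
  else if c ∈ ((PySem.Dict.mk aff).getD "solid_collectable" "").toList then 'Q'
  else if c ∈ ((PySem.Dict.mk aff).getD "weapon" "").toList then 'W'
  else if c ∈ ((PySem.Dict.mk aff).getD "moving" "").toList then 'M'
  else if c ∈ ((PySem.Dict.mk aff).getD "door" "").toList then 'D'
  else if c ∈ ((PySem.Dict.mk aff).getD "climbable" "").toList then '|'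
  else if c = 'P' then 'P'
  else '-'

def affordify (line : String) (aff : List (String × String)) : String :=
  String.ofList (line.toList.foldl (fun acc c => acc ++ [affCharA aff c]) [])

-- ===== PORT B =====
def bOrder : List (String × Char) :=
  [("solid", 'X'), ("breakable", 'B'), ("hazard", 'H'), ("enemies", 'E'),
   ("collectable", '*'), ("solid_collectable", 'Q'), ("weapon", 'W'),
   ("moving", 'M'), ("door", 'D'), ("climbable", '|')]

-- one pass of 'for i in todo' (line[i] ported as getElem?.getD ' ': todo holds valid indices only)
def catPass (cs : List Char) (members : PySem.Set Char) (sym : Char)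
    (st : List Char × List Nat) (i : Nat) : List Char × List Nat :=
  if (cs[i]?).getD ' ' ∈ members then (st.1.set i sym, st.2) else (st.1, st.2 ++ [i])

-- 'for key, sym in ORDER: if not todo: break; members = set(aff[key]); …' (aff[key] as getD: exact on Pre_)
def catLoop (cs : List Char) (aff : List (String × String)) :
    List (String × Char) → List Char → List Nat → List Char
  | [], out, _ => out
  | p :: ps, out, todo =>
    if todo.isEmpty then out
    else
      catLoop cs aff ps
        (todo.foldl (catPass cs (PySem.Set.ofList ((PySem.Dict.mk aff).getD p.1 "").toList) p.2) (out, [])).1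
        (todo.foldl (catPass cs (PySem.Set.ofList ((PySem.Dict.mk aff).getD p.1 "").toList) p.2) (out, [])).2

def affordify_alt (line : String) (aff : List (String × String)) : String :=
  let cs := line.toList
  String.ofList
    (catLoop cs aff bOrder (cs.map (fun c => if c = 'P' then 'P' else '-'))
      (List.range cs.length))

-- ===== PRECONDITION & SPEC =====
def affKeys : List String :=
  ["solid", "breakable", "hazard", "enemies", "collectable",
   "solid_collectable", "weapon", "moving", "door", "climbable"]

-- Pre_ is exactly the inputs on which A (and B, whose raising set is the same) returns,
-- i.e. no KeyError: each char must match some category whose key and all higher-priority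
-- keys are present in aff, or else all ten keys must be present.
def Pre_affordify (line : String) (aff : List (String × String)) : Prop :=
  line.toList.all (fun c =>
    affKeys.all (fun k => aff.any (fun p => p.1 == k)) ||
    (List.range affKeys.length).any (fun i =>
      (affKeys.take (i + 1)).all (fun k => aff.any (fun p => p.1 == k)) &&
      ((PySem.Dict.mk aff).getD (affKeys[i]?.getD "") "").toList.contains c)) = true
instance (line : String) (aff : List (String × String)) : Decidable (Pre_affordify line aff) := by unfold Pre_affordify; infer_instance

def pvWitness_affordify : String × (List (String × String)) :=
  ("aPz", [("solid", "a"), ("breakable", ""), ("hazard", ""), ("enemies", ""),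
           ("collectable", ""), ("solid_collectable", ""), ("weapon", ""),
           ("moving", ""), ("door", ""), ("climbable", "z")])

def Spec_affordify (line : String) (aff : List (String × String)) (out : String) : Prop := out = affordify_alt line aff
instance (line : String) (aff : List (String × String)) (out : String) : Decidable (Spec_affordify line aff out) := by unfold Spec_affordify; infer_instance

-- ===== CLAIM (what is proved, stated in full; the proofs are below) =====
def Claim_equal_affordify : Prop := ∀ (line : String) (aff : List (String × String)), Dom_affordify line aff → Pre_affordify line aff → Spec_affordify line aff (affordify line aff)

-- ===== LEMMAS AND PROOFS =====
-- the priority cascade over a list of (category key, symbol) passes, as an Option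
def casc (aff : List (String × String)) : List (String × Char) → Char → Option Char
  | [], _ => none
  | p :: ps, c =>
    if c ∈ ((PySem.Dict.mk aff).getD p.1 "").toList then some p.2 else casc aff ps c

-- A's cascade, read off the casc of the full category list
set_option maxHeartbeats 1000000 in
theorem affCharA_eq (aff : List (String × String)) (c : Char) :
    affCharA aff c = (casc aff bOrder c).getD (if c = 'P' then 'P' else '-') := by
  simp only [bOrder, casc, affCharA]
  split_ifs <;> simp_all

theorem catPass_fold_len (cs : List Char) (members : PySem.Set Char) (sym : Char)
    (todo : List Nat) (st : List Char × List Nat) :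
    (todo.foldl (catPass cs members sym) st).1.length = st.1.length := by
  induction todo generalizing st with
  | nil => rfl
  | cons i todo ih =>
    rw [List.foldl_cons, ih]
    unfold catPass; split_ifs <;> simp

-- one pass leaves exactly the non-matching indices pending
theorem catPass_fold_snd (cs : List Char) (members : PySem.Set Char) (sym : Char)
    (todo : List Nat) (st : List Char × List Nat) :
    (todo.foldl (catPass cs members sym) st).2 =
      st.2 ++ todo.filter (fun i => !(decide ((cs[i]?).getD ' ' ∈ members))) := by
  induction todo generalizing st with
  | nil => simp
  | cons i todo ih =>
    rw [List.foldl_cons, ih]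
    unfold catPass
    by_cases h : (cs[i]?).getD ' ' ∈ members <;> simp [h]

-- one pass stamps its symbol on the matching indices of todo and nothing else
theorem catPass_fold_get? (cs : List Char) (members : PySem.Set Char) (sym : Char)
    (todo : List Nat) (st : List Char × List Nat) (j : Nat) (hj : j < st.1.length) :
    (todo.foldl (catPass cs members sym) st).1[j]? =
      if j ∈ todo ∧ (cs[j]?).getD ' ' ∈ members then some sym else st.1[j]? := by
  induction todo generalizing st with
  | nil => simp
  | cons i todo ih =>
    rw [List.foldl_cons]
    have hlen : (catPass cs members sym st i).1.length = st.1.length := by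
      unfold catPass; split_ifs <;> simp
    rw [ih _ (by omega)]
    unfold catPass
    by_cases hij : j = i
    · subst hij
      by_cases hm : (cs[j]?).getD ' ' ∈ members <;>
        simp [hm, List.getElem?_set, hj]
    · by_cases hm : (cs[i]?).getD ' ' ∈ members <;>
        by_cases hjt : j ∈ todo <;>
        by_cases hjm : (cs[j]?).getD ' ' ∈ members <;>
        simp [hm, hjt, hjm, List.getElem?_set, hij, Ne.symm hij]

theorem catLoop_len (cs : List Char) (aff : List (String × String))
    (ps : List (String × Char)) (out : List Char) (todo : List Nat) :
    (catLoop cs aff ps out todo).length = out.length := by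
  induction ps generalizing out todo with
  | nil => rfl
  | cons p ps ih =>
    unfold catLoop
    split_ifs with h
    · rfl
    · rw [ih, catPass_fold_len]

-- the category loop resolves each still-pending index by the cascade of the remaining passes
theorem catLoop_get? (cs : List Char) (aff : List (String × String))
    (ps : List (String × Char)) (out : List Char) (todo : List Nat) (j : Nat)
    (hj : j < out.length) :
    (catLoop cs aff ps out todo)[j]? =
      if j ∈ todo ∧ (casc aff ps ((cs[j]?).getD ' ')).isSome
      then casc aff ps ((cs[j]?).getD ' ') else out[j]? := by
  induction ps generalizing out todo with
  | nil => simp [catLoop, casc]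
  | cons p ps ih =>
    by_cases h : todo.isEmpty
    · have ht : todo = [] := List.isEmpty_iff.mp h
      subst ht
      simp [catLoop]
    · show (catLoop cs aff (p :: ps) out todo)[j]? = _
      rw [catLoop, if_neg h]
      rw [ih _ _ (by rw [catPass_fold_len]; exact hj)]
      rw [catPass_fold_snd, catPass_fold_get? _ _ _ _ _ _ hj]
      simp only [List.nil_append, List.mem_filter, PySem.Set.mem_ofList, casc]
      by_cases hjt : j ∈ todo <;>
        by_cases hjm : (cs[j]?).getD ' ' ∈ ((PySem.Dict.mk aff).getD p.1 "").toList <;>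
        cases hcs : casc aff ps ((cs[j]?).getD ' ') <;>
        simp [hjt, hjm, hcs]

-- ===== VERDICT (by name: the statement is the Claim_ definition above) =====
theorem affordify_spec : Claim_equal_affordify := by
  intro line aff _ _
  unfold Spec_affordify affordify affordify_alt
  rw [PySem.List.foldl_append_singleton_eq_map]
  simp only [List.nil_append]
  congr 1
  apply List.ext_getElem?
  intro j
  by_cases hj : j < line.toList.length
  · rw [catLoop_get? _ _ _ _ _ _ (by simpa using hj)]
    have hgd : (line.toList[j]?).getD ' ' = line.toList[j] := by
      simp [List.getElem?_eq_getElem hj]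
    simp only [List.mem_range, hj, true_and, hgd, List.getElem?_map,
      List.getElem?_eq_getElem hj, Option.map_some]
    rw [affCharA_eq]
    cases hcs : casc aff bOrder line.toList[j] <;> simp [hcs]
  · rw [List.getElem?_eq_none_iff.2 (by simpa using Nat.le_of_not_lt hj),
      List.getElem?_eq_none_iff.2]
    rw [catLoop_len]
    simpa using Nat.le_of_not_lt hj
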